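-- pv_equiv track=rewrite | github.com/LSaldyt/MIT-AI-Implementations | galway/diffengine/heuristics.py | _build_summary_dict
-- ===== SOURCE A (Python) =====
-- from collections import namedtuple
--
-- CharInfo = namedtuple('CharInfo', ['indices', 'count'])
--
-- def _build_summary_dict(s):
--     d = dict()
--     for i, c in enumerate(s):
--         if c in d:
--             indices, count = d[c]
--             d[c] = CharInfo(indices + [i], count + 1)
--         else:
--             d[c] = CharInfo([i], 1)
--     return d
-- ===== SOURCE B (Python) =====
-- from collections import namedtuple
--
-- CharInfo = namedtuple('CharInfo', ['indices', 'count'])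
--
-- def _build_summary_dict(s):
--     table = {}
--     for i, c in enumerate(s):
--         table.setdefault(c, []).append(i)
--     return {c: CharInfo(idx, len(idx)) for c, idx in table.items()}
-- ===== Notes on version B (the rewrite author's own statement) =====
-- stated objective: faster
-- what changed: B splits the work into two passes: one loop appending each index to a per-char list via dict.setdefault (in-place, amortized O(1)), then a dict comprehension deriving each count as len(indices); A's single loop rebuilds CharInfo by list concatenation, copying the index list on every repeated character (quadratic on repeat-heavy strings).
import Mathlib
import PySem

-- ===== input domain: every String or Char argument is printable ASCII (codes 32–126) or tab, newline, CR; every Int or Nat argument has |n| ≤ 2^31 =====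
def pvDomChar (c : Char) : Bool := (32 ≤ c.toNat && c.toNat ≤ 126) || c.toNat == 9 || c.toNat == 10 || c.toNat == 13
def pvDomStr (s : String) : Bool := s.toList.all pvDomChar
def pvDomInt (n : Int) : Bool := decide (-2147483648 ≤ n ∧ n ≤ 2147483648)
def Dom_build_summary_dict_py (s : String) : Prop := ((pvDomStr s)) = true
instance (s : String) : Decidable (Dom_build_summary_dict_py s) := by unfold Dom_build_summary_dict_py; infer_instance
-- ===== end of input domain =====

-- B replaces A's single incremental loop by two passes: collect index lists, then derive counts as len(indices); objective: simpler.

-- ===== PORT A =====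
-- one loop over enumerate(s); on a repeated char, unpack the stored CharInfo and rebuild it
-- (d[c] under the 'c in d' guard is ported as getD with an unreachable default)
def build_summary_dict_py (s : String) : List (String × List Int × Int) :=
  ((PySem.List.enumerate s.toList 0).foldl
    (fun (d : PySem.Dict String (List Int × Int)) (p : Int × Char) =>
      let c := String.ofList [p.2]
      if d.contains c then
        let ic := d.getD c ([], 0)
        d.insert c (ic.1 ++ [p.1], ic.2 + 1)
      else
        d.insert c ([p.1], 1))
    PySem.Dict.empty).items

-- ===== PORT B =====
-- pass 1: table.setdefault(c, []).append(i) ≡ table[c] = table.get(c, []) + [i], i.e. Dict.modify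
-- pass 2: dict comprehension over table.items deriving count = len(indices)
def build_summary_dict_py_alt (s : String) : List (String × List Int × Int) :=
  let table := (PySem.List.enumerate s.toList 0).foldl
    (fun (d : PySem.Dict String (List Int)) (p : Int × Char) =>
      d.modify (String.ofList [p.2]) [] (· ++ [p.1]))
    PySem.Dict.empty
  table.items.map (fun q => (q.1, q.2, (q.2.length : Int)))

-- ===== PRECONDITION & SPEC =====
def Spec_build_summary_dict_py (s : String) (out : List (String × List Int × Int)) : Prop := out = build_summary_dict_py_alt s
instance (s : String) (out : List (String × List Int × Int)) : Decidable (Spec_build_summary_dict_py s out) := by unfold Spec_build_summary_dict_py; infer_instance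

-- ===== CLAIM (what is proved, stated in full; the proofs are below) =====
def Claim_equal_build_summary_dict_py : Prop := ∀ (s : String), Dom_build_summary_dict_py s → Spec_build_summary_dict_py s (build_summary_dict_py s)

-- ===== LEMMAS AND PROOFS =====

-- A's loop body, written as a single insert (both branches insert the same value)
theorem stepA_eq (d : PySem.Dict String (List Int × Int)) (p : Int × Char) :
    (let c := String.ofList [p.2]
     if d.contains c then
       let ic := d.getD c ([], 0)
       d.insert c (ic.1 ++ [p.1], ic.2 + 1)
     else
       d.insert c ([p.1], 1))
    = d.insert (String.ofList [p.2])
        ((d.getD (String.ofList [p.2]) ([], 0)).1 ++ [p.1],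
         (d.getD (String.ofList [p.2]) ([], 0)).2 + 1) := by
  by_cases h : d.contains (String.ofList [p.2])
  · simp [h]
  · simp only [Bool.not_eq_true] at h
    simp [h, PySem.Dict.getD_of_not_contains d _ h]

-- value of A's accumulating fold at any key
theorem getD_foldA (l : List (String × Int)) (d : PySem.Dict String (List Int × Int)) (c : String) :
    (l.foldl (fun d q => d.insert q.1 ((d.getD q.1 ([], 0)).1 ++ [q.2], (d.getD q.1 ([], 0)).2 + 1)) d).getD c ([], 0)
    = ((d.getD c ([], 0)).1 ++ ((l.filter (fun q => q.1 == c)).map (·.2)),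
       (d.getD c ([], 0)).2 + (((l.filter (fun q => q.1 == c)).map (·.2)).length : Int)) := by
  induction l generalizing d with
  | nil => simp
  | cons q l ih =>
    simp only [List.foldl_cons, ih, List.filter_cons]
    by_cases h : q.1 = c
    · subst h
      simp [PySem.Dict.getD_insert_self, List.append_assoc]
      omega
    · rw [PySem.Dict.getD_insert_of_ne d _ _ (fun hc => h hc.symm)]
      simp [beq_iff_eq, h]

-- ===== VERDICT (by name: the statement is the Claim_ definition above) =====
theorem build_summary_dict_py_spec : Claim_equal_build_summary_dict_py := by
  intro s _
  unfold Spec_build_summary_dict_py build_summary_dict_py build_summary_dict_py_alt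
  -- view both loops as folds over the (key, index) list l'
  set l' : List (String × Int) :=
    (PySem.List.enumerate s.toList 0).map (fun p => (String.ofList [p.2], p.1)) with hl'
  have hA : (PySem.List.enumerate s.toList 0).foldl
      (fun (d : PySem.Dict String (List Int × Int)) (p : Int × Char) =>
        let c := String.ofList [p.2]
        if d.contains c then
          let ic := d.getD c ([], 0)
          d.insert c (ic.1 ++ [p.1], ic.2 + 1)
        else
          d.insert c ([p.1], 1))
      PySem.Dict.empty
      = l'.foldl (fun d q => d.insert q.1 ((d.getD q.1 ([], 0)).1 ++ [q.2], (d.getD q.1 ([], 0)).2 + 1))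
          PySem.Dict.empty := by
    rw [hl', List.foldl_map]
    exact congrFun (congrFun (congrArg _ (funext fun d => funext fun p => stepA_eq d p)) _) _
  have hB : (PySem.List.enumerate s.toList 0).foldl
      (fun (d : PySem.Dict String (List Int)) (p : Int × Char) =>
        d.modify (String.ofList [p.2]) [] (· ++ [p.1]))
      PySem.Dict.empty
      = l'.foldl (fun d q => d.modify q.1 [] (· ++ [q.2])) PySem.Dict.empty := by
    rw [hl', List.foldl_map]
  rw [hA, hB]
  show _ = List.map (fun q : String × List Int => (q.1, q.2, (q.2.length : Int))) _
  set dA : PySem.Dict String (List Int × Int) := l'.foldl (fun d q => d.insert q.1 ((d.getD q.1 ([], 0)).1 ++ [q.2], (d.getD q.1 ([], 0)).2 + 1))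
      PySem.Dict.empty with hdA
  set dB : PySem.Dict String (List Int) := l'.foldl (fun (d : PySem.Dict String (List Int)) q => d.modify q.1 [] (· ++ [q.2]))
      PySem.Dict.empty with hdB
  have hkA : dA.keys = PySem.Set.update PySem.Dict.empty.keys (l'.map (fun q => q.1)) :=
    PySem.Dict.keys_foldl_insert_key l' (fun q => q.1)
      (fun d q => ((d.getD q.1 ([], 0)).1 ++ [q.2], (d.getD q.1 ([], 0)).2 + 1)) _
  have hkB : dB.keys = PySem.Set.update PySem.Dict.empty.keys (l'.map (fun q => q.1)) :=
    PySem.Dict.keys_foldl_modify_key l' (fun q => q.1) [] (fun _ q v => v ++ [q.2]) _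
  have hndA : dA.keys.Nodup :=
    PySem.Dict.nodup_keys_foldl_insert_key l' (fun q => q.1) _ _ PySem.Dict.nodup_keys_empty
  have hndB : dB.keys.Nodup :=
    PySem.Dict.nodup_keys_foldl_modify_key l' (fun q => q.1) [] _ _ PySem.Dict.nodup_keys_empty
  rw [PySem.Dict.items_eq_map_keys dA hndA ([], 0), PySem.Dict.items_eq_map_keys dB hndB [],
      hkA, hkB]
  simp only [List.map_map]
  refine List.map_congr_left (fun c _ => ?_)
  have h1 := getD_foldA l' PySem.Dict.empty c
  have h2 := PySem.Dict.getD_foldl_modify_append l' PySem.Dict.empty c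
  rw [← hdA] at h1
  rw [← hdB] at h2
  simp [h1, h2, PySem.Dict.getD_empty, Function.comp]
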